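-- pv_equiv track=rewrite | github.com/ElectricP0ison/Lab1-2022110631 | test_find_bridge-whitebox.py | extract_bridge_words
-- ===== SOURCE A (Python) =====
-- def extract_bridge_words(result_text):
--     if "are:" not in result_text:
--         return set()
--     bridge_str = result_text.split("are: ")[1].rstrip('! .')
--     parts = bridge_str.split(', ')
--     bridges = []
--     for part in parts:
--         if ' and ' in part:
--             bridges.extend(part.split(' and '))
--         else:
--             bridges.append(part)
--     return set(bridges)
-- ===== SOURCE B (Python) =====
-- def extract_bridge_words(result_text):
--     if "are:" not in result_text:
--         return set()
--     s = result_text.split("are: ")[1].rstrip('! .')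
--     tokens = set()
--     cur = ''
--     i = 0
--     n = len(s)
--     while i < n:
--         if s.startswith(', ', i):
--             tokens.add(cur)
--             cur = ''
--             i += 2
--         elif s.startswith(' and ', i):
--             tokens.add(cur)
--             cur = ''
--             i += 5
--         else:
--             cur += s[i]
--             i += 1
--     tokens.add(cur)
--     return tokens
-- ===== Notes on version B (the rewrite author's own statement) =====
-- stated objective: alternative
-- what changed: A first splits the suffix on ', ' and then re-splits each part that contains ' and ' inside a loop; B makes one left-to-right scan that emits a token at the leftmost occurrence of either delimiter, adding tokens to the set as they are found (the delimiters cannot overlap, so the cut points coincide).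
import Mathlib
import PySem

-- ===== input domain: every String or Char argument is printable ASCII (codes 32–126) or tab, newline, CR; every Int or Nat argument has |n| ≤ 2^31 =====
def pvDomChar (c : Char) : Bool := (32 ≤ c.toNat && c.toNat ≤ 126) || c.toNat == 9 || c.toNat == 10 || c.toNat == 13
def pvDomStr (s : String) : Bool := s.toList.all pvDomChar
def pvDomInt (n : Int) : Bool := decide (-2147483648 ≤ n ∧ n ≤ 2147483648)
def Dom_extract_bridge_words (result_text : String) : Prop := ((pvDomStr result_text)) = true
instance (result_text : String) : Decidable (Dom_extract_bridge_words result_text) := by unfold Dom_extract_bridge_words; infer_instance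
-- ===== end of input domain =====

-- B differs from A by a single left-to-right scan over the delimiters instead of split(', ') followed by
-- a per-part split(' and '); return values only (neither Python mutates its argument).

-- s.rstrip('! .') — hand port (PySem has no rstrip-with-chars); exact: drops trailing chars from {'!',' ','.'}
def pvRstripChars (cs : List Char) : List Char :=
  (cs.reverse.dropWhile (fun c => c == '!' || c == ' ' || c == '.')).reverse

def pvRstrip (s : String) : String := String.ofList (pvRstripChars s.toList)

-- ===== PORT A =====
def extract_bridge_words (result_text : String) : List String :=
  if PySem.Str.isIn "are:" result_text = false then PySem.Set.empty
  else
    let bridge_str := pvRstrip (PySem.List.pyGetD ((PySem.Str.split? result_text "are: ").getD []) 1 "")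
    let parts := PySem.Chars.splitOn bridge_str.toList [',', ' ']
    let bridges := parts.foldl (fun acc part =>
      if PySem.Chars.isIn [' ', 'a', 'n', 'd', ' '] part = true
      then acc ++ PySem.Chars.splitOn part [' ', 'a', 'n', 'd', ' ']
      else acc ++ [part]) []
    PySem.Set.ofList (bridges.map (fun cs => String.ofList cs))

-- ===== PORT B =====
-- B's scanner: at each position, cut at ', ' or ' and ' if one starts here, else move one char into cur
def pvScan (s : List Char) (cur : List Char) : List (List Char) :=
  if h1 : [',', ' '].isPrefixOf s then cur :: pvScan (s.drop 2) []
  else if h2 : [' ', 'a', 'n', 'd', ' '].isPrefixOf s then cur :: pvScan (s.drop 5) []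
  else match s with
    | [] => [cur]
    | c :: rest => pvScan rest (cur ++ [c])
termination_by s.length
decreasing_by
  · have := (List.isPrefixOf_iff_prefix.mp h1).length_le; simp at this ⊢; omega
  · have := (List.isPrefixOf_iff_prefix.mp h2).length_le; simp at this ⊢; omega
  · simp

def extract_bridge_words_alt (result_text : String) : List String :=
  if PySem.Str.isIn "are:" result_text = false then PySem.Set.empty
  else
    let s := pvRstrip (PySem.List.pyGetD ((PySem.Str.split? result_text "are: ").getD []) 1 "")
    PySem.Set.ofList ((pvScan s.toList []).map (fun cs => String.ofList cs))

-- ===== PRECONDITION & SPEC =====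
-- Pre_ excludes exactly the inputs containing "are:" but not "are: ": there split("are: ") yields a
-- single piece and A's [1] raises IndexError (B raises identically).
def Pre_extract_bridge_words (result_text : String) : Prop :=
  PySem.Str.isIn "are:" result_text = true → PySem.Str.isIn "are: " result_text = true
instance (result_text : String) : Decidable (Pre_extract_bridge_words result_text) := by
  unfold Pre_extract_bridge_words; infer_instance

def pvWitness_extract_bridge_words : String := "The bridge words are: alpha, beta and gamma!"

def Spec_extract_bridge_words (result_text : String) (out : List String) : Prop :=
  out = extract_bridge_words_alt result_text
instance (result_text : String) (out : List String) : Decidable (Spec_extract_bridge_words result_text out) := by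
  unfold Spec_extract_bridge_words; infer_instance

-- ===== CLAIM (what is proved, stated in full; the proofs are below) =====
def Claim_equal_extract_bridge_words : Prop := ∀ (result_text : String), Dom_extract_bridge_words result_text → Pre_extract_bridge_words result_text → Spec_extract_bridge_words result_text (extract_bridge_words result_text)

-- ===== LEMMAS AND PROOFS =====

-- prepend a list to the first token of a token list
def pvModHead (a : List Char) : List (List Char) → List (List Char)
  | [] => [a]
  | h :: t => (a ++ h) :: t

theorem pvModHead_modHead (a b : List Char) (X : List (List Char)) :
    pvModHead a (pvModHead b X) = pvModHead (a ++ b) X := by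
  cases X <;> simp [pvModHead]

-- reference recursion for Python's str.split(sep) (sep ≠ [])
def pvSplitRec (sep : List Char) (l : List Char) : List (List Char) :=
  if h : sep ≠ [] ∧ sep.isPrefixOf l then [] :: pvSplitRec sep (l.drop sep.length)
  else match l with
    | [] => [[]]
    | c :: rest => pvModHead [c] (pvSplitRec sep rest)
termination_by l.length
decreasing_by
  · have h2 := (List.isPrefixOf_iff_prefix.mp h.2).length_le
    have h1 : 0 < sep.length := List.length_pos_iff.2 h.1
    simp; omega
  · simp

theorem pvSplitRec_shape (sep l : List Char) :
    ∃ h t, pvSplitRec sep l = h :: t ∧ h <+: l := by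
  induction l using pvSplitRec.induct sep with
  | case1 l h ih => rw [pvSplitRec]; simp [h]
  | case2 h =>
      rw [pvSplitRec]; simp [h]
  | case3 c rest h ih =>
      rw [pvSplitRec]; rw [dif_neg h]
      obtain ⟨h', t', heq, hpre⟩ := ih
      exact ⟨c :: h', t', by simp [heq, pvModHead], List.cons_prefix_cons.2 ⟨rfl, hpre⟩⟩

theorem pvSplitRec_ne_nil (sep l : List Char) : pvSplitRec sep l ≠ [] := by
  obtain ⟨h, t, heq, _⟩ := pvSplitRec_shape sep l; simp [heq]

theorem pvModHead_nil_of_ne (X : List (List Char)) (h : X ≠ []) : pvModHead [] X = X := by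
  cases X with
  | nil => exact absurd rfl h
  | cons a b => simp [pvModHead]

-- the splitter of the PySem prelude computes pvSplitRec
theorem pv_go_spec (sep : List Char) (hsep : sep ≠ []) (fuel : Nat) :
    ∀ l cur acc, l.length ≤ fuel →
      PySem.Chars.splitOn.go sep fuel l cur acc =
        acc.reverse ++ pvModHead cur.reverse (pvSplitRec sep l) := by
  induction fuel with
  | zero =>
      intro l cur acc hl
      have : l = [] := List.length_eq_zero_iff.1 (Nat.le_zero.1 hl)
      subst this
      rw [pvSplitRec]
      simp [PySem.Chars.splitOn.go, pvModHead, hsep]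
  | succ fuel ih =>
      intro l cur acc hl
      cases l with
      | nil =>
          rw [pvSplitRec]
          simp [PySem.Chars.splitOn.go, pvModHead, hsep]
      | cons c rest =>
          rw [pvSplitRec]
          by_cases hp : sep.isPrefixOf (c :: rest)
          · have hlen : 0 < sep.length := List.length_pos_iff.2 hsep
            have hle : ((c :: rest).drop sep.length).length ≤ fuel := by
              have := (List.isPrefixOf_iff_prefix.mp hp).length_le
              simp at this hl ⊢
              omega
            simp only [PySem.Chars.splitOn.go, hp, if_true, hsep, ne_eq, not_false_iff, true_and,
              dite_true]
            rw [ih _ _ _ hle]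
            have hne := pvSplitRec_ne_nil sep ((c :: rest).drop sep.length)
            rw [List.reverse_nil, pvModHead_nil_of_ne _ hne]
            simp [pvModHead]
          · have hle : rest.length ≤ fuel := by simp at hl; omega
            simp only [PySem.Chars.splitOn.go, hp, Bool.false_eq_true, if_false]
            rw [ih _ _ _ hle]
            rw [dif_neg (by simp [hp]), pvModHead_modHead, List.reverse_cons]
theorem pv_splitOn_eq (l sep : List Char) (hsep : sep ≠ []) :
    PySem.Chars.splitOn l sep = pvSplitRec sep l := by
  unfold PySem.Chars.splitOn
  rw [pv_go_spec sep hsep _ l [] [] (by omega)]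
  exact (by simpa using pvModHead_nil_of_ne _ (pvSplitRec_ne_nil sep l))

-- split on an absent separator is the whole string
theorem pvSplitRec_of_not_infix (sep l : List Char) (h : ¬ sep <:+: l) :
    pvSplitRec sep l = [l] := by
  induction l with
  | nil => rw [pvSplitRec]; simp [fun hp : sep.isPrefixOf ([] : List Char) = true => h (List.isPrefixOf_iff_prefix.mp hp).isInfix]
  | cons c rest ih =>
      rw [pvSplitRec]
      have hp : ¬ sep.isPrefixOf (c :: rest) = true := fun hp => h (List.isPrefixOf_iff_prefix.mp hp).isInfix
      have hr : ¬ sep <:+: rest := fun hi => h (hi.trans (List.suffix_cons c rest).isInfix)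
      rw [dif_neg (by simp [hp])]
      simp [ih hr, pvModHead]

-- A's token list, after the foldl and the redundant 'if' are rewritten away
def pvTok (l : List Char) : List (List Char) :=
  (pvSplitRec [',', ' '] l).flatMap (pvSplitRec [' ', 'a', 'n', 'd', ' '])

theorem pvTok_ne_nil (l : List Char) : pvTok l ≠ [] := by
  obtain ⟨h, t, heq, _⟩ := pvSplitRec_shape [',', ' '] l
  obtain ⟨h2, t2, heq2, _⟩ := pvSplitRec_shape [' ', 'a', 'n', 'd', ' '] h
  simp [pvTok, heq, heq2]

theorem pvSplitRec_cons_not_prefix (sep : List Char) (c : Char) (rest : List Char)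
    (h : ¬ sep.isPrefixOf (c :: rest)) :
    pvSplitRec sep (c :: rest) = pvModHead [c] (pvSplitRec sep rest) := by
  rw [pvSplitRec]; rw [dif_neg (by simp [h])]

theorem pvSplitRec_prefix (sep l : List Char) (hsep : sep ≠ []) (h : sep.isPrefixOf l) :
    pvSplitRec sep l = [] :: pvSplitRec sep (l.drop sep.length) := by
  rw [pvSplitRec]; rw [dif_pos ⟨hsep, h⟩]

-- one scanner step over a plain character
theorem pvTok_cons (c : Char) (rest : List Char)
    (h1 : ¬ [',', ' '].isPrefixOf (c :: rest) = true)
    (h2 : ¬ [' ', 'a', 'n', 'd', ' '].isPrefixOf (c :: rest) = true) :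
    pvTok (c :: rest) = pvModHead [c] (pvTok rest) := by
  obtain ⟨h, t, heq, hpre⟩ := pvSplitRec_shape [',', ' '] rest
  obtain ⟨h2h, t2, heq2, _⟩ := pvSplitRec_shape [' ', 'a', 'n', 'd', ' '] h
  have h2' : ¬ [' ', 'a', 'n', 'd', ' '].isPrefixOf (c :: h) = true := by
    intro hp
    exact h2 (List.isPrefixOf_iff_prefix.mpr
      ((List.isPrefixOf_iff_prefix.mp hp).trans (List.cons_prefix_cons.2 ⟨rfl, hpre⟩)))
  have hrest : pvTok rest = h2h :: (t2 ++ t.flatMap (pvSplitRec [' ', 'a', 'n', 'd', ' '])) := by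
    rw [pvTok, heq]; simp [heq2]
  rw [pvTok, pvSplitRec_cons_not_prefix _ _ _ h1, heq]
  simp only [pvModHead, List.flatMap_cons, List.singleton_append]
  rw [pvSplitRec_cons_not_prefix _ _ _ h2', heq2]
  simp [pvModHead, hrest]

-- the scanner cut at ', '
theorem pvTok_comma (rest : List Char) :
    pvTok ([',', ' '] ++ rest) = [] :: pvTok rest := by
  rw [pvTok, pvSplitRec_prefix [',', ' '] _ (by simp) (by simp [List.isPrefixOf])]
  have h0 : pvSplitRec [' ', 'a', 'n', 'd', ' '] [] = [[]] := by
    rw [pvSplitRec]; simp [List.isPrefixOf]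
  simp [pvTok, h0]

-- the scanner cut at ' and '
theorem pvTok_and (rest : List Char) :
    pvTok ([' ', 'a', 'n', 'd', ' '] ++ rest) = [] :: pvTok rest := by
  obtain ⟨h1, t1, heq, hpre⟩ := pvSplitRec_shape [',', ' '] rest
  have step : ∀ (c : Char) (l : List Char), c ≠ ',' →
      pvSplitRec [',', ' '] (c :: l) = pvModHead [c] (pvSplitRec [',', ' '] l) := by
    intro c l hc
    refine pvSplitRec_cons_not_prefix _ _ _ ?_
    simp [List.isPrefixOf]
    intro hcc
    exact absurd hcc.symm hc
  have hexp : [' ', 'a', 'n', 'd', ' '] ++ rest = ' ' :: 'a' :: 'n' :: 'd' :: ' ' :: rest := rfl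
  rw [pvTok, hexp, step _ _ (by decide), step _ _ (by decide), step _ _ (by decide),
      step _ _ (by decide), step _ _ (by decide), heq]
  simp only [pvModHead_modHead, pvModHead, List.flatMap_cons]
  rw [pvSplitRec_prefix [' ', 'a', 'n', 'd', ' '] _ (by simp)
      (List.isPrefixOf_iff_prefix.mpr ⟨h1, by simp⟩)]
  rw [pvTok, heq]
  simp

-- main invariant: the scanner computes A's tokens, with cur prepended to the first one
theorem pvScan_eq_tok (s cur : List Char) : pvScan s cur = pvModHead cur (pvTok s) := by
  induction s, cur using pvScan.induct with
  | case1 s cur h1 ih =>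
      obtain ⟨u, hu⟩ := List.isPrefixOf_iff_prefix.mp h1
      subst hu
      rw [pvScan, dif_pos h1]
      have hd : List.drop 2 ([',', ' '] ++ u) = u := by simp
      rw [hd] at ih ⊢
      rw [ih, pvTok_comma, pvModHead_nil_of_ne _ (pvTok_ne_nil _)]
      simp [pvModHead]
  | case2 s cur h1 h2 ih =>
      obtain ⟨u, hu⟩ := List.isPrefixOf_iff_prefix.mp h2
      subst hu
      rw [pvScan, dif_neg h1, dif_pos h2]
      have hd : List.drop 5 ([' ', 'a', 'n', 'd', ' '] ++ u) = u := by simp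
      rw [hd] at ih ⊢
      rw [ih, pvTok_and, pvModHead_nil_of_ne _ (pvTok_ne_nil _)]
      simp [pvModHead]
  | case3 cur h1 h2 =>
      rw [pvScan, dif_neg h1, dif_neg h2]
      have h0 : pvTok [] = [[]] := by
        rw [pvTok, pvSplitRec]
        simp [List.isPrefixOf]
        rw [pvSplitRec]
        simp [List.isPrefixOf]
      simp [h0, pvModHead]
  | case4 cur c rest h1 h2 ih =>
      rw [pvScan, dif_neg h1, dif_neg h2]
      have hr : pvModHead cur (pvTok (c :: rest)) = pvModHead (cur ++ [c]) (pvTok rest) := by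
        rw [pvTok_cons c rest h1 h2, pvModHead_modHead]
      rw [hr]
      exact ih

-- ===== VERDICT (by name: the statement is the Claim_ definition above) =====

theorem pv_main (l : List Char) :
    (PySem.Chars.splitOn l [',', ' ']).foldl (fun acc part =>
      if PySem.Chars.isIn [' ', 'a', 'n', 'd', ' '] part = true
      then acc ++ PySem.Chars.splitOn part [' ', 'a', 'n', 'd', ' ']
      else acc ++ [part]) [] = pvScan l [] := by
  have hfun : (fun (acc : List (List Char)) part =>
      if PySem.Chars.isIn [' ', 'a', 'n', 'd', ' '] part = true
      then acc ++ PySem.Chars.splitOn part [' ', 'a', 'n', 'd', ' ']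
      else acc ++ [part]) = fun acc part => acc ++ pvSplitRec [' ', 'a', 'n', 'd', ' '] part := by
    funext acc part
    by_cases hin : PySem.Chars.isIn [' ', 'a', 'n', 'd', ' '] part = true
    · rw [if_pos hin, pv_splitOn_eq _ _ (by simp)]
    · rw [if_neg hin]
      have hni : ¬ [' ', 'a', 'n', 'd', ' '] <:+: part := by
        rw [← PySem.Chars.isIn_eq_false_iff]
        simpa using hin
      rw [pvSplitRec_of_not_infix _ _ hni]
  rw [hfun, PySem.List.foldl_append_eq_flatMap, pv_splitOn_eq _ _ (by simp)]
  rw [pvScan_eq_tok, pvModHead_nil_of_ne _ (pvTok_ne_nil _), pvTok]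
  simp

theorem extract_bridge_words_spec : Claim_equal_extract_bridge_words := by
  intro result_text _ _
  unfold Spec_extract_bridge_words
  simp only [extract_bridge_words, extract_bridge_words_alt]
  by_cases hg : PySem.Str.isIn "are:" result_text = false
  · rw [if_pos hg, if_pos hg]
  · rw [if_neg hg, if_neg hg, pv_main]
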